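-- pv_equiv track=rewrite | github.com/RyuMyunggi/algorithm | programmers/stack_queue/level_2.py | solution
-- ===== SOURCE A (Python) =====
-- def solution(progresses, speeds):
--     answer = []
--     temp_answers = []
--     for i in range(0, len(progresses)):
--         progress = progresses[i]
--         speed = speeds[i]
--
--         idx = 0
--         while True:
--             if progress >= 100:
--                 break
--             progress += speed
--             idx += 1
--
--         temp_answers.append(idx)
--
--     i = 0
--     while True:
--         try:
--             answer1 = temp_answers[i]
--         except:
--             break
--         count = 1
--         while True:
--             j = i + 1
--             try:
--                 answer2 = temp_answers[j]
--             except: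
--                 answer.append(count)
--                 i = j
--                 break
--             if answer1 < answer2:
--                 answer.append(count)
--                 i = j
--                 break
--             else:
--                 count += 1
--                 i += 1
--
--     return answer
-- ===== SOURCE B (Python) =====
-- def solution(progresses, speeds):
--     # closed-form ceiling instead of a unit-step simulation loop
--     days = [0 if p >= 100 else -((p - 100) // s)
--             for p, s in zip(progresses, speeds)]
--     if not days:
--         return []
--     answer = []
--     first, count = days[0], 1
--     for d in days[1:]:
--         if d <= first:
--             count += 1
--         else:
--             answer.append(count)
--             first, count = d, 1
--     answer.append(count)
--     return answer
-- ===== Notes on version B (the rewrite author's own statement) =====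
-- stated objective: simpler
-- what changed: Replaces A's increment-until-100 inner while loop by a closed-form ceiling division per task, and A's try/except double-while index walk by a single linear scan that counts days not exceeding the group's first day.
import Mathlib
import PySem

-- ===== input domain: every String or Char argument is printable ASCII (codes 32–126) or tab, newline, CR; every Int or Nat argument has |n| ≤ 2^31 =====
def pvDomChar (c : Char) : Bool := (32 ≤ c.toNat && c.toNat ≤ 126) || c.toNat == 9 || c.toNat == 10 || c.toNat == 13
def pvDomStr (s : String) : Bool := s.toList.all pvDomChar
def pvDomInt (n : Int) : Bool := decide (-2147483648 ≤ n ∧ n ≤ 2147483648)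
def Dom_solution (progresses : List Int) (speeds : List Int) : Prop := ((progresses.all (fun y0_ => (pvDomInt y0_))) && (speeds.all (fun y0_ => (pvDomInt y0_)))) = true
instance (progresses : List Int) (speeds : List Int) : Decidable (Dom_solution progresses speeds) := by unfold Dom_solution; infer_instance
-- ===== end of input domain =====

-- B replaces A's unit-step day simulation by a closed-form ceiling division and A's
-- try/except double-while grouping by one linear scan (objective: simpler).


-- ===== PORT A =====
-- inner 'while True' of A: step progress by speed, counting idx, until progress >= 100.
-- If speed ≤ 0 and progress < 100 the Python loop never terminates; that case is outside
-- Pre_solution and the port returns a junk 0 there (totality guard only).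
def solutionDay (progress speed idx : Int) : Int :=
  if 100 ≤ progress then idx
  else if h : speed ≤ 0 then 0
  else solutionDay (progress + speed) speed (idx + 1)
termination_by (100 - progress).toNat
decreasing_by omega

mutual
-- A's outer 'while True': try temp[i], on IndexError break.
def solutionOuter (temp : List Int) (i : Nat) (answer : List Int) : List Int :=
  match temp[i]? with
  | none => answer
  | some answer1 => solutionInner temp answer1 i 1 answer
termination_by (temp.length - i, 1)

-- A's inner 'while True': try temp[i+1]; on IndexError append count and break (the outer
-- loop then breaks too, since i = j is out of range); if answer1 < answer2 append count and
-- resume the outer loop at j; else count += 1.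
def solutionInner (temp : List Int) (answer1 : Int) (i : Nat) (count : Int) (answer : List Int) : List Int :=
  match h : temp[i+1]? with
  | none => answer ++ [count]
  | some answer2 =>
    if answer1 < answer2 then solutionOuter temp (i+1) (answer ++ [count])
    else solutionInner temp answer1 (i+1) (count + 1) answer
termination_by (temp.length - i, 0)
decreasing_by
  · have : i + 1 < temp.length := (List.getElem?_eq_some_iff.mp h).1
    exact Prod.Lex.left _ _ (by omega)
  · have : i + 1 < temp.length := (List.getElem?_eq_some_iff.mp h).1
    exact Prod.Lex.left _ _ (by omega)
end

def solution (progresses : List Int) (speeds : List Int) : List Int :=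
  let temp := (PySem.List.pyRange 0 progresses.length 1).foldl
    (fun acc i => acc ++ [solutionDay (PySem.List.pyGetD progresses i 0) (PySem.List.pyGetD speeds i 0) 0]) []
  solutionOuter temp 0 []

-- ===== PORT B =====
def solutionAltLoop (rest : List Int) (first count : Int) (answer : List Int) : List Int :=
  match rest with
  | [] => answer ++ [count]
  | d :: ds =>
    if d ≤ first then solutionAltLoop ds first (count + 1) answer
    else solutionAltLoop ds d 1 (answer ++ [count])

def solution_alt (progresses : List Int) (speeds : List Int) : List Int :=
  let days := (progresses.zip speeds).map
    (fun ps => if 100 ≤ ps.1 then 0 else -(PySem.Int.floordiv (ps.1 - 100) ps.2))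
  match days with
  | [] => []
  | d0 :: rest => solutionAltLoop rest d0 1 []

-- ===== PRECONDITION & SPEC =====
-- Pre_ excludes exactly the inputs on which A does not return: speeds shorter than
-- progresses (IndexError) and any task with progress < 100 and speed ≤ 0 (infinite loop).
def Pre_solution (progresses : List Int) (speeds : List Int) : Prop :=
  progresses.length ≤ speeds.length ∧
  ∀ i ∈ List.range progresses.length, 100 ≤ progresses.getD i 0 ∨ 1 ≤ speeds.getD i 0
instance (progresses : List Int) (speeds : List Int) : Decidable (Pre_solution progresses speeds) := by
  unfold Pre_solution; infer_instance

def pvWitness_solution : List Int × List Int := ([93, 30, 55], [1, 30, 5])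

def Spec_solution (progresses : List Int) (speeds : List Int) (out : List Int) : Prop := out = solution_alt progresses speeds
instance (progresses : List Int) (speeds : List Int) (out : List Int) : Decidable (Spec_solution progresses speeds out) := by unfold Spec_solution; infer_instance

-- ===== CLAIM (what is proved, stated in full; the proofs are below) =====
def Claim_equal_solution : Prop := ∀ (progresses : List Int) (speeds : List Int), Dom_solution progresses speeds → Pre_solution progresses speeds → Spec_solution progresses speeds (solution progresses speeds)


-- ===== LEMMAS AND PROOFS =====

-- the simulated day count equals the closed-form ceiling
theorem solutionDay_eq : ∀ (p s idx : Int), 100 ≤ p ∨ 1 ≤ s →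
    solutionDay p s idx = idx + (if 100 ≤ p then 0 else -(PySem.Int.floordiv (p - 100) s)) := by
  intro p s idx
  induction p, idx using solutionDay.induct (speed := s) with
  | case1 p idx hp => intro _; rw [solutionDay]; simp [hp]
  | case2 p idx hp hs => intro h; rcases h with h | h <;> omega
  | case3 p idx hp hs ih =>
    intro h
    have hs1 : (1:Int) ≤ s := by omega
    rw [solutionDay, if_neg hp, dif_neg hs, ih (Or.inr hs1)]
    rw [if_neg hp]
    have e1 : p - 100 = -(100 - p) := by ring
    by_cases hps : 100 ≤ p + s
    · rw [if_pos hps, e1]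
      rw [(PySem.Int.neg_floordiv_neg_eq_iff_of_pos (a := 100 - p) (b := s) (q := 1) (by omega)).2
        (by constructor <;> nlinarith)]
      ring
    · rw [if_neg hps, e1]
      have e2 : p + s - 100 = -(100 - (p+s)) := by ring
      have key := (PySem.Int.neg_floordiv_neg_eq_iff_of_pos (a := 100 - (p+s)) (b := s)
        (q := -(PySem.Int.floordiv (p+s-100) s)) (by omega)).1 (by rw [e2])
      rw [(PySem.Int.neg_floordiv_neg_eq_iff_of_pos (a := 100 - p) (b := s)
        (q := 1 + -(PySem.Int.floordiv (p+s-100) s)) (by omega)).2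
        (by constructor <;> nlinarith [key.1, key.2])]
      ring

-- A's inner while-walk over temp from position i equals B's scan of the suffix after i
theorem inner_eq_loop (temp ds : List Int) (i : Nat) (first count : Int) (acc : List Int)
    (hds : temp.drop (i+1) = ds) :
    solutionInner temp first i count acc = solutionAltLoop ds first count acc := by
  induction ds generalizing i first count acc with
  | nil =>
    have h0 : temp[i+1]? = none := by rw [← List.head?_drop, hds]; rfl
    rw [solutionInner, solutionAltLoop]
    split
    · rfl
    · next heq => rw [h0] at heq; cases heq
  | cons d dstl ih =>
    have h1 : temp[i+1]? = some d := by rw [← List.head?_drop, hds]; rfl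
    have h2 : temp.drop (i+1+1) = dstl := by rw [← List.tail_drop, hds]; rfl
    rw [solutionInner, solutionAltLoop]
    split
    · next heq => rw [h1] at heq; cases heq
    · next answer2 heq =>
      rw [h1] at heq
      injection heq with heq'
      subst heq'
      by_cases hc : first < d
      · rw [if_pos hc, if_neg (by omega : ¬ d ≤ first), solutionOuter]
        rw [show temp[i+1]? = some d from h1]
        exact ih (i+1) d 1 (acc ++ [count]) h2
      · rw [if_neg hc, if_pos (by omega : d ≤ first)]
        exact ih (i+1) first (count+1) acc h2

-- A's grouping of a list equals B's
theorem group_eq (temp : List Int) :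
    solutionOuter temp 0 [] = (match temp with
      | [] => []
      | d0 :: rest => solutionAltLoop rest d0 1 []) := by
  cases temp with
  | nil => rw [solutionOuter]; rfl
  | cons d0 rest =>
    rw [solutionOuter]
    split
    · next heq => simp at heq
    · next a1 heq =>
      simp only [List.getElem?_cons_zero, Option.some.injEq] at heq
      subst heq
      exact inner_eq_loop _ rest 0 d0 1 [] (by simp)

-- the temp list A builds equals B's days list
theorem temp_eq (progresses speeds : List Int) (hpre : Pre_solution progresses speeds) :
    (PySem.List.pyRange 0 progresses.length 1).foldl
      (fun acc i => acc ++ [solutionDay (PySem.List.pyGetD progresses i 0) (PySem.List.pyGetD speeds i 0) 0]) []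
    = (progresses.zip speeds).map
        (fun ps => if 100 ≤ ps.1 then 0 else -(PySem.Int.floordiv (ps.1 - 100) ps.2)) := by
  obtain ⟨hlen, hel⟩ := hpre
  rw [PySem.List.foldl_append_singleton_eq_map, PySem.List.pyRange_zero_nat, List.map_map]
  simp only [List.nil_append]
  apply List.ext_getElem
  · simp [List.length_zip]; omega
  · intro i h1 h2
    simp only [List.getElem_map, Function.comp_apply, List.getElem_range, List.getElem_zip]
    have hi : i < progresses.length := by simpa using h1
    have hi2 : i < speeds.length := by omega
    rw [PySem.List.pyGetD_natCast, PySem.List.pyGetD_natCast]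
    rw [List.getD_eq_getElem _ _ hi, List.getD_eq_getElem _ _ hi2]
    rw [solutionDay_eq _ _ _ (by
      have := hel i (List.mem_range.mpr hi)
      rw [List.getD_eq_getElem _ _ hi, List.getD_eq_getElem _ _ hi2] at this
      exact this)]
    simp

-- ===== VERDICT (by name: the statement is the Claim_ definition above) =====
theorem solution_spec : Claim_equal_solution := by
  intro progresses speeds _ hpre
  unfold Spec_solution solution solution_alt
  rw [temp_eq progresses speeds hpre, group_eq]
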